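-- pv_equiv track=rewrite | github.com/MQTool/L4D2-MOD-Tools | 目白麦昆的MOD制作工具箱/Python程序/快速材质分件_ctk.py | _check_descendant_specifies_level
-- ===== SOURCE A (Python) =====
-- from collections import defaultdict, deque
--
-- def _check_descendant_specifies_level(node_idx, graph, nodes_specifying_level):
--     """Checks if any descendant of node_idx specifies a level using BFS."""
--     queue = deque(graph.get(node_idx, []))
--     visited = set(graph.get(node_idx, []))
--     visited.add(node_idx) # Don't check self
--
--     while queue:
--         current = queue.popleft()
--         if current in nodes_specifying_level:
--             return True # Found descendant specifying level
--
--         for child in graph.get(current, []):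
--             if child not in visited:
--                 visited.add(child)
--                 queue.append(child)
--     return False # No descendant found
-- ===== SOURCE B (Python) =====
-- def _check_descendant_specifies_level(node_idx, graph, nodes_specifying_level):
--     """Fixed-point edge relaxation: repeatedly sweep every (src, children) entry of the
--     graph, propagating a 'descendant' mark from marked sources to their children
--     (never to node_idx itself), until a full sweep changes nothing; then test the
--     marked set against nodes_specifying_level."""
--     marked = set(graph.get(node_idx, []))
--     changed = True
--     while changed:
--         changed = False
--         for src, children in graph.items():
--             if src in marked:
--                 for c in children:
--                     if c != node_idx and c not in marked:
--                         marked.add(c)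
--                         changed = True
--     return any(c in nodes_specifying_level for c in marked)
-- ===== Notes on version B (the rewrite author's own statement) =====
-- stated objective: alternative
-- what changed: A's worklist BFS (queue + visited set, early return) is replaced by a Bellman-Ford-style fixed-point: repeated full sweeps over the graph's (src, children) entries propagate a descendant mark from marked sources until a sweep changes nothing, then one membership pass tests the marked set; no queue, stack or frontier is kept.
import Mathlib
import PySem

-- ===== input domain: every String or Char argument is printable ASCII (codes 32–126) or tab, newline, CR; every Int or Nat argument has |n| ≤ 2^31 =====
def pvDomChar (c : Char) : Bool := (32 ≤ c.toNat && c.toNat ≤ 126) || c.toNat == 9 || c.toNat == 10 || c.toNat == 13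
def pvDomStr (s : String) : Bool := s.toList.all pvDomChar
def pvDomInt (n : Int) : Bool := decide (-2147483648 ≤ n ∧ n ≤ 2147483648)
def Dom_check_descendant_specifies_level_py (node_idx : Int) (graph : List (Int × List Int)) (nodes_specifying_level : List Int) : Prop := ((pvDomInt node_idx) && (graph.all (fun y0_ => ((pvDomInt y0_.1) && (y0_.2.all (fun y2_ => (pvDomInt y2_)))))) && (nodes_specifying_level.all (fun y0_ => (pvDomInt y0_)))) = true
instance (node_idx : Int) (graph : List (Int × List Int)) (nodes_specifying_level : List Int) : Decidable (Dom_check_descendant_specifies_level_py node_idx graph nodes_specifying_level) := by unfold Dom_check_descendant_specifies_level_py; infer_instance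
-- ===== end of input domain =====

-- B replaces A's worklist BFS by a Bellman-Ford-style fixed point: repeated full sweeps over the
-- graph's (src, children) entries propagate a descendant mark until a sweep changes nothing,
-- then one membership pass tests the marked set (objective: alternative).

-- ===== PORT A =====
-- graph.get(n, []) on the dict argument
def pvChildren (graph : List (Int × List Int)) (n : Int) : List Int :=
  PySem.Dict.getD (PySem.Dict.mk graph) n []

-- all children values occurring anywhere in the graph (proof-side bound used by termination)
def pvAllNodes (graph : List (Int × List Int)) : List Int :=
  graph.flatMap (fun p => p.2)

theorem pvChildren_subset_all (graph : List (Int × List Int)) (n : Int) :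
    ∀ x ∈ pvChildren graph n, x ∈ pvAllNodes graph := by
  induction graph with
  | nil =>
      intro x hx
      have : pvChildren ([] : List (Int × List Int)) n = [] := by
        rw [pvChildren, PySem.Dict.getD_eq_get?_getD]
        rfl
      rw [this] at hx
      simp at hx
  | cons p rest ih =>
      intro x hx
      rcases p with ⟨k, cs⟩
      rw [pvChildren, PySem.Dict.getD_eq_get?_getD, PySem.Dict.get?_mk_cons] at hx
      simp only [pvAllNodes, List.flatMap_cons, List.mem_append]
      by_cases hk : (k == n) = true
      · rw [if_pos hk] at hx
        exact Or.inl hx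
      · rw [if_neg hk] at hx
        refine Or.inr ?_
        have := ih x (by rw [pvChildren, PySem.Dict.getD_eq_get?_getD]; exact hx)
        simpa [pvAllNodes] using this

-- the elements A's inner for-loop appends (first occurrences not yet visited)
def pvNewA (visited : List Int) : List Int → List Int
  | [] => []
  | c :: cs => if visited.contains c then pvNewA visited cs else c :: pvNewA (visited ++ [c]) cs

theorem mem_pvNewA (cs : List Int) : ∀ (v : List Int) (x : Int),
    x ∈ pvNewA v cs ↔ x ∈ cs ∧ x ∉ v := by
  induction cs with
  | nil => intro v x; simp [pvNewA]
  | cons c cs ih =>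
      intro v x
      by_cases hc : v.contains c
      · have hc' : c ∈ v := by simpa [List.contains_eq_mem] using hc
        rw [pvNewA, if_pos hc, ih v x]
        simp only [List.mem_cons]
        constructor
        · rintro ⟨h1, h2⟩; exact ⟨Or.inr h1, h2⟩
        · rintro ⟨(rfl | h1), h2⟩
          · exact absurd hc' h2
          · exact ⟨h1, h2⟩
      · have hc' : c ∉ v := by simpa [List.contains_eq_mem] using hc
        rw [pvNewA, if_neg hc]
        simp only [List.mem_cons, ih (v ++ [c]) x, List.mem_append]
        constructor
        · rintro (rfl | ⟨h1, h2⟩)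
          · exact ⟨Or.inl rfl, hc'⟩
          · exact ⟨Or.inr h1, fun hv => h2 (Or.inl hv)⟩
        · rintro ⟨(rfl | h1), h2⟩
          · exact Or.inl rfl
          · by_cases hxc : x = c
            · exact Or.inl hxc
            · exact Or.inr ⟨h1, by tauto⟩

theorem nodup_pvNewA (cs : List Int) : ∀ (v : List Int), (pvNewA v cs).Nodup := by
  induction cs with
  | nil => intro v; simp [pvNewA]
  | cons c cs ih =>
      intro v
      by_cases hc : v.contains c
      · rw [pvNewA, if_pos hc]; exact ih v
      · rw [pvNewA, if_neg hc]
        refine List.nodup_cons.mpr ⟨fun hmem => ?_, ih _⟩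
        have := (mem_pvNewA cs (v ++ [c]) c).mp hmem
        simp at this

-- A's inner for-loop (append unvisited children to queue and visited)
def pvFoldStepA (q v cs : List Int) : List Int × List Int :=
  cs.foldl (fun (p : List Int × List Int) child =>
    if p.2.contains child then p else (p.1 ++ [child], PySem.Set.add p.2 child)) (q, v)

theorem pvFoldA (cs : List Int) : ∀ (q v : List Int),
    pvFoldStepA q v cs = (q ++ pvNewA v cs, v ++ pvNewA v cs) := by
  induction cs with
  | nil => intro q v; simp [pvFoldStepA, pvNewA]
  | cons c cs ih =>
      intro q v
      rw [pvFoldStepA, List.foldl_cons]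
      by_cases hc : v.contains c
      · rw [show (if (q, v).2.contains c = true then (q, v)
              else ((q, v).1 ++ [c], PySem.Set.add (q, v).2 c)) = (q, v) from if_pos hc]
        rw [show List.foldl (fun (p : List Int × List Int) child =>
              if p.2.contains child then p else (p.1 ++ [child], PySem.Set.add p.2 child)) (q, v) cs
            = pvFoldStepA q v cs from rfl, ih q v, pvNewA, if_pos hc]
      · rw [show (if (q, v).2.contains c = true then (q, v)
              else ((q, v).1 ++ [c], PySem.Set.add (q, v).2 c)) = (q ++ [c], v ++ [c]) from by
              rw [if_neg hc]
              have hcm : c ∉ v := by simpa [List.contains_eq_mem] using hc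
              simp [PySem.Set.add, hcm]]
        rw [show List.foldl (fun (p : List Int × List Int) child =>
              if p.2.contains child then p else (p.1 ++ [child], PySem.Set.add p.2 child)) (q ++ [c], v ++ [c]) cs
            = pvFoldStepA (q ++ [c]) (v ++ [c]) cs from rfl, ih (q ++ [c]) (v ++ [c]), pvNewA, if_neg hc]
        simp

-- counting lemma for A's termination measure
theorem pvCount_le (all v new : List Int) (hnd : new.Nodup)
    (hmem : ∀ x ∈ new, x ∈ all ∧ x ∉ v) :
    (all.filter (fun x => !(v ++ new).contains x)).length + new.length
      ≤ (all.filter (fun x => !v.contains x)).length := by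
  have heq : all.filter (fun x => !(v ++ new).contains x)
      = (all.filter (fun x => !v.contains x)).filter (fun x => !new.contains x) := by
    rw [List.filter_filter]
    apply List.filter_congr
    intro x _
    by_cases hv : x ∈ v <;> by_cases hn : x ∈ new <;> simp [hv, hn]
  have hsplit := List.length_eq_length_filter_add
    (l := all.filter (fun x => !v.contains x)) (fun x => new.contains x)
  have hsplit' : (all.filter (fun x => !v.contains x)).length
      = ((all.filter (fun x => !v.contains x)).filter (fun x => new.contains x)).length
        + ((all.filter (fun x => !v.contains x)).filter (fun x => !new.contains x)).length := by
    simpa using hsplit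
  have hlen : new.length
      ≤ ((all.filter (fun x => !v.contains x)).filter (fun x => new.contains x)).length := by
    have hsub : new ⊆ (all.filter (fun x => !v.contains x)).filter (fun x => new.contains x) := by
      intro x hx
      rcases hmem x hx with ⟨ha, hv⟩
      simp [List.mem_filter, ha, hv, hx]
    calc new.length = new.toFinset.card := (List.toFinset_card_of_nodup hnd).symm
      _ ≤ ((all.filter (fun x => !v.contains x)).filter (fun x => new.contains x)).toFinset.card := by
          apply Finset.card_le_card
          intro x hx
          simp only [List.mem_toFinset] at hx ⊢
          exact hsub hx
      _ ≤ _ := List.toFinset_card_le _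
  have heq' : (all.filter (fun x => !(v ++ new).contains x)).length
      = ((all.filter (fun x => !v.contains x)).filter (fun x => !new.contains x)).length := by
    rw [heq]
  omega

-- the while-loop of A (BFS over queue/visited)
def pvBfsLoop (graph : List (Int × List Int)) (lv : List Int) :
    List Int → List Int → Bool
  | [], _ => false
  | current :: rest, visited =>
    if lv.contains current then true
    else
      let st := pvFoldStepA rest visited (pvChildren graph current)
      pvBfsLoop graph lv st.1 st.2
  termination_by q v => 2 * ((pvAllNodes graph).filter (fun x => !v.contains x)).length + q.length
  decreasing_by
    rw [pvFoldA]
    have hnd := nodup_pvNewA (pvChildren graph current) visited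
    have hmem : ∀ x ∈ pvNewA visited (pvChildren graph current),
        x ∈ pvAllNodes graph ∧ x ∉ visited := by
      intro x hx
      rcases (mem_pvNewA _ _ _).mp hx with ⟨h1, h2⟩
      exact ⟨pvChildren_subset_all graph current x h1, h2⟩
    have := pvCount_le (pvAllNodes graph) visited (pvNewA visited (pvChildren graph current)) hnd hmem
    simp only [List.length_append, List.length_cons]
    omega

def check_descendant_specifies_level_py (node_idx : Int) (graph : List (Int × List Int)) (nodes_specifying_level : List Int) : Bool :=
  let queue := pvChildren graph node_idx
  let visited : PySem.Set Int := PySem.Set.add (PySem.Set.ofList (pvChildren graph node_idx)) node_idx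
  pvBfsLoop graph nodes_specifying_level queue visited

-- ===== PORT B =====
-- graph.items(): one entry per key, first occurrence (the entry Dict.get? first-match lookup reads)
def pvItems (seen : List Int) : List (Int × List Int) → List (Int × List Int)
  | [] => []
  | p :: rest =>
    if seen.contains p.1 then pvItems seen rest
    else p :: pvItems (seen ++ [p.1]) rest

-- the inner for-loop of B (mark fresh non-self children, record the change)
def pvInner (node_idx : Int) (cs : List Int) (st : List Int × Bool) : List Int × Bool :=
  cs.foldl (fun st c =>
    if c ≠ node_idx ∧ st.1.contains c = false then (PySem.Set.add st.1 c, true) else st) st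

-- one full sweep of B over all graph entries
def pvPass (node_idx : Int) (items : List (Int × List Int)) (st : List Int × Bool) : List Int × Bool :=
  items.foldl (fun st p => if st.1.contains p.1 then pvInner node_idx p.2 st else st) st

theorem pvInner_mono (node_idx : Int) (cs : List Int) : ∀ (st : List Int × Bool) (x : Int),
    x ∈ st.1 → x ∈ (pvInner node_idx cs st).1 := by
  induction cs with
  | nil => intro st x hx; exact hx
  | cons c cs ih =>
      intro st x hx
      rw [pvInner, List.foldl_cons]
      by_cases hc : c ≠ node_idx ∧ st.1.contains c = false
      · rw [if_pos hc]
        exact ih _ x (by rw [PySem.Set.mem_add]; exact Or.inl hx)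
      · rw [if_neg hc]; exact ih st x hx

theorem pvInner_true (node_idx : Int) (cs : List Int) : ∀ (st : List Int × Bool),
    st.2 = true → (pvInner node_idx cs st).2 = true := by
  induction cs with
  | nil => intro st h; exact h
  | cons c cs ih =>
      intro st h
      rw [pvInner, List.foldl_cons]
      by_cases hc : c ≠ node_idx ∧ st.1.contains c = false
      · rw [if_pos hc]; exact ih _ rfl
      · rw [if_neg hc]; exact ih st h

theorem pvInner_false (node_idx : Int) (cs : List Int) : ∀ (st : List Int × Bool),
    (pvInner node_idx cs st).2 = false →
    (pvInner node_idx cs st).1 = st.1 ∧ ∀ c ∈ cs, c = node_idx ∨ c ∈ st.1 := by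
  induction cs with
  | nil => intro st _; exact ⟨rfl, by simp⟩
  | cons c cs ih =>
      intro st h
      rw [pvInner, List.foldl_cons] at h
      by_cases hc : c ≠ node_idx ∧ st.1.contains c = false
      · rw [if_pos hc] at h
        have htrue := pvInner_true node_idx cs (PySem.Set.add st.1 c, true) rfl
        rw [pvInner] at htrue
        rw [htrue] at h
        exact absurd h (by simp)
      · rw [if_neg hc] at h
        have h' : (pvInner node_idx cs st).2 = false := h
        rcases ih st h' with ⟨h1, h2⟩
        constructor
        · rw [pvInner, List.foldl_cons, if_neg hc]; exact h1
        · intro d hd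
          rcases List.mem_cons.mp hd with rfl | hd
          · by_cases hdn : d = node_idx
            · exact Or.inl hdn
            · right
              have : ¬ st.1.contains d = false := fun hf => hc ⟨hdn, hf⟩
              simpa [List.contains_eq_mem] using this
          · exact h2 d hd

theorem pvInner_changed (node_idx : Int) (cs : List Int) : ∀ (st : List Int × Bool),
    st.2 = false → (pvInner node_idx cs st).2 = true →
    ∃ x, x ∈ (pvInner node_idx cs st).1 ∧ x ∉ st.1 ∧ x ∈ cs := by
  induction cs with
  | nil => intro st h1 h2; rw [pvInner] at h2; simp [h1] at h2
  | cons c cs ih =>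
      intro st h1 h2
      rw [pvInner, List.foldl_cons] at h2 ⊢
      by_cases hc : c ≠ node_idx ∧ st.1.contains c = false
      · rw [if_pos hc] at h2 ⊢
        refine ⟨c, ?_, ?_, List.mem_cons_self⟩
        · exact pvInner_mono node_idx cs _ c (by rw [PySem.Set.mem_add]; exact Or.inr rfl)
        · simpa [List.contains_eq_mem] using hc.2
      · rw [if_neg hc] at h2 ⊢
        rcases ih st h1 h2 with ⟨x, hx1, hx2, hx3⟩
        exact ⟨x, hx1, hx2, List.mem_cons_of_mem _ hx3⟩

theorem pvPass_mono (node_idx : Int) (items : List (Int × List Int)) :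
    ∀ (st : List Int × Bool) (x : Int), x ∈ st.1 → x ∈ (pvPass node_idx items st).1 := by
  induction items with
  | nil => intro st x hx; exact hx
  | cons p rest ih =>
      intro st x hx
      rw [pvPass, List.foldl_cons]
      by_cases hp : st.1.contains p.1
      · rw [if_pos hp]; exact ih _ x (pvInner_mono node_idx p.2 st x hx)
      · rw [if_neg hp]; exact ih st x hx

theorem pvPass_changed (node_idx : Int) (items : List (Int × List Int)) :
    ∀ (st : List Int × Bool), st.2 = false → (pvPass node_idx items st).2 = true →
      ∃ x, x ∈ (pvPass node_idx items st).1 ∧ x ∉ st.1 ∧ ∃ p ∈ items, x ∈ p.2 := by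
  induction items with
  | nil => intro st h1 h2; rw [pvPass] at h2; simp only [List.foldl_nil] at h2; simp [h1] at h2
  | cons p rest ih =>
      intro st h1 h2
      rw [pvPass, List.foldl_cons] at h2 ⊢
      by_cases hp : st.1.contains p.1
      · rw [if_pos hp] at h2 ⊢
        by_cases hin : (pvInner node_idx p.2 st).2 = true
        · rcases pvInner_changed node_idx p.2 st h1 hin with ⟨x, hx1, hx2, hx3⟩
          exact ⟨x, pvPass_mono node_idx rest _ x hx1, hx2, p, List.mem_cons_self, hx3⟩
        · have hfalse : (pvInner node_idx p.2 st).2 = false := by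
            cases hb : (pvInner node_idx p.2 st).2
            · rfl
            · exact absurd hb hin
          rcases pvInner_false node_idx p.2 st hfalse with ⟨hi1, _⟩
          have hst : pvInner node_idx p.2 st = (st.1, false) := by
            rw [← hi1, ← hfalse]
          rw [hst] at h2 ⊢
          rcases ih (st.1, false) rfl h2 with ⟨x, hx1, hx2, hx3⟩
          exact ⟨x, hx1, hx2, by
            rcases hx3 with ⟨q, hq, hxq⟩
            exact ⟨q, List.mem_cons_of_mem _ hq, hxq⟩⟩
      · rw [if_neg hp] at h2 ⊢
        rcases ih st h1 h2 with ⟨x, hx1, hx2, q, hq, hxq⟩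
        exact ⟨x, hx1, hx2, q, List.mem_cons_of_mem _ hq, hxq⟩

-- the while-loop of B: sweep until a pass changes nothing
def pvFixLoop (node_idx : Int) (items : List (Int × List Int)) (marked : List Int) : List Int :=
  let st := pvPass node_idx items (marked, false)
  if h : st.2 = true then pvFixLoop node_idx items st.1 else st.1
  termination_by ((items.flatMap (fun p => p.2)).filter (fun x => !marked.contains x)).length
  decreasing_by
    rcases pvPass_changed node_idx items (marked, false) rfl h with ⟨x, hx1, hx2, p, hp, hxp⟩
    have hxall : x ∈ items.flatMap (fun p => p.2) := List.mem_flatMap.mpr ⟨p, hp, hxp⟩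
    have hmono : ∀ y ∈ marked, y ∈ (pvPass node_idx items (marked, false)).1 :=
      fun y hy => pvPass_mono node_idx items (marked, false) y hy
    have hsub : List.Sublist ((items.flatMap (fun p => p.2)).filter
        (fun y => !(pvPass node_idx items (marked, false)).1.contains y))
        ((items.flatMap (fun p => p.2)).filter (fun y => !marked.contains y)) := by
      apply List.monotone_filter_right
      intro a ha
      simp only [Bool.not_eq_eq_eq_not, Bool.not_true, List.contains_eq_mem, decide_eq_false_iff_not] at ha ⊢
      exact fun hm => ha (hmono a hm)
    have hne : (items.flatMap (fun p => p.2)).filter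
        (fun y => !(pvPass node_idx items (marked, false)).1.contains y)
        ≠ (items.flatMap (fun p => p.2)).filter (fun y => !marked.contains y) := by
      intro heq
      have hxin : x ∈ (items.flatMap (fun p => p.2)).filter (fun y => !marked.contains y) := by
        simp only [List.mem_filter, Bool.not_eq_eq_eq_not, Bool.not_true, List.contains_eq_mem,
          decide_eq_false_iff_not]
        exact ⟨hxall, hx2⟩
      rw [← heq] at hxin
      simp only [List.mem_filter, Bool.not_eq_eq_eq_not, Bool.not_true, List.contains_eq_mem,
        decide_eq_false_iff_not] at hxin
      exact hxin.2 hx1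
    have hle := hsub.length_le
    have : ((items.flatMap (fun p => p.2)).filter
        (fun y => !(pvPass node_idx items (marked, false)).1.contains y)).length
        ≠ ((items.flatMap (fun p => p.2)).filter (fun y => !marked.contains y)).length :=
      fun hl => hne (hsub.eq_of_length hl)
    omega

def check_descendant_specifies_level_py_alt (node_idx : Int) (graph : List (Int × List Int)) (nodes_specifying_level : List Int) : Bool :=
  let marked : PySem.Set Int := PySem.Set.ofList (pvChildren graph node_idx)
  (pvFixLoop node_idx (pvItems [] graph) marked).any (fun c => nodes_specifying_level.contains c)

-- ===== PRECONDITION & SPEC =====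
def Spec_check_descendant_specifies_level_py (node_idx : Int) (graph : List (Int × List Int)) (nodes_specifying_level : List Int) (out : Bool) : Prop := out = check_descendant_specifies_level_py_alt node_idx graph nodes_specifying_level
instance (node_idx : Int) (graph : List (Int × List Int)) (nodes_specifying_level : List Int) (out : Bool) : Decidable (Spec_check_descendant_specifies_level_py node_idx graph nodes_specifying_level out) := by unfold Spec_check_descendant_specifies_level_py; infer_instance

-- ===== CLAIM (what is proved, stated in full; the proofs are below) =====
def Claim_equal_check_descendant_specifies_level_py : Prop := ∀ (node_idx : Int) (graph : List (Int × List Int)) (nodes_specifying_level : List Int), Dom_check_descendant_specifies_level_py node_idx graph nodes_specifying_level → Spec_check_descendant_specifies_level_py node_idx graph nodes_specifying_level (check_descendant_specifies_level_py node_idx graph nodes_specifying_level)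

-- ===== LEMMAS AND PROOFS =====

theorem pvPass_true (node_idx : Int) (items : List (Int × List Int)) :
    ∀ (st : List Int × Bool), st.2 = true → (pvPass node_idx items st).2 = true := by
  induction items with
  | nil => intro st h; exact h
  | cons p rest ih =>
      intro st h
      rw [pvPass, List.foldl_cons]
      by_cases hp : st.1.contains p.1
      · rw [if_pos hp]; exact ih _ (pvInner_true node_idx p.2 st h)
      · rw [if_neg hp]; exact ih st h

theorem pvPass_false (node_idx : Int) (items : List (Int × List Int)) :
    ∀ (st : List Int × Bool), (pvPass node_idx items st).2 = false →
      (pvPass node_idx items st).1 = st.1 ∧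
      ∀ p ∈ items, st.1.contains p.1 → ∀ c ∈ p.2, c = node_idx ∨ c ∈ st.1 := by
  induction items with
  | nil => intro st _; exact ⟨rfl, by simp⟩
  | cons p rest ih =>
      intro st h
      rw [pvPass, List.foldl_cons] at h
      by_cases hp : st.1.contains p.1
      · rw [if_pos hp] at h
        have h' : (pvPass node_idx rest (pvInner node_idx p.2 st)).2 = false := h
        by_cases hin : (pvInner node_idx p.2 st).2 = true
        · have htrue := pvPass_true node_idx rest _ hin
          rw [htrue] at h'
          exact absurd h' (by simp)
        · have hfalse : (pvInner node_idx p.2 st).2 = false := by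
            cases hb : (pvInner node_idx p.2 st).2
            · rfl
            · exact absurd hb hin
          rcases pvInner_false node_idx p.2 st hfalse with ⟨hi1, hi2⟩
          have hstEq : pvInner node_idx p.2 st = (st.1, false) := by
            rw [← hi1, ← hfalse]
          rw [hstEq] at h'
          rcases ih (st.1, false) h' with ⟨h1, h2⟩
          constructor
          · rw [pvPass, List.foldl_cons, if_pos hp, hstEq]; exact h1
          · intro q hq hqc
            rcases List.mem_cons.mp hq with rfl | hq
            · exact hi2
            · exact h2 q hq hqc
      · rw [if_neg hp] at h
        have h' : (pvPass node_idx rest st).2 = false := h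
        rcases ih st h' with ⟨h1, h2⟩
        constructor
        · rw [pvPass, List.foldl_cons, if_neg hp]; exact h1
        · intro q hq hqc
          rcases List.mem_cons.mp hq with rfl | hq
          · exact absurd hqc (by simpa using hp)
          · exact h2 q hq hqc


-- reachability along graph edges from the worklist q, never stepping into v
inductive PvReach (graph : List (Int × List Int)) (v q : List Int) : Int → Prop
  | base {n : Int} : n ∈ q → PvReach graph v q n
  | step {c d : Int} : PvReach graph v q c → d ∈ pvChildren graph c → d ∉ v → PvReach graph v q d

theorem pvReach_nil (graph : List (Int × List Int)) (v : List Int) (n : Int) :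
    ¬ PvReach graph v [] n := by
  intro h
  induction h with
  | base hb => simp at hb
  | step _ _ _ ih => exact ih

theorem pvReach_congr {graph : List (Int × List Int)} {v q v' q' : List Int} {n : Int}
    (hq : ∀ x : Int, x ∈ q ↔ x ∈ q') (hv : ∀ x : Int, x ∈ v ↔ x ∈ v')
    (h : PvReach graph v q n) : PvReach graph v' q' n := by
  induction h with
  | base hb => exact PvReach.base ((hq _).mp hb)
  | step _ hd hdv ih => exact PvReach.step ih hd (fun hx => hdv ((hv _).mpr hx))

theorem pvReach_expand {graph : List (Int × List Int)} {v q new : List Int} {c : Int}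
    (hnew : ∀ d : Int, d ∈ new ↔ d ∈ pvChildren graph c ∧ d ∉ v) (n : Int) :
    PvReach graph v (c :: q) n ↔ n = c ∨ PvReach graph (v ++ new) (q ++ new) n := by
  constructor
  · intro h
    induction h with
    | base hb =>
        rcases List.mem_cons.mp hb with h | h
        · exact Or.inl h
        · exact Or.inr (PvReach.base (List.mem_append_left _ h))
    | @step c₀ d hr hd hdv ih =>
        rcases ih with rfl | ih
        · exact Or.inr (PvReach.base (List.mem_append_right _ ((hnew d).mpr ⟨hd, hdv⟩)))
        · by_cases hdn : d ∈ new
          · exact Or.inr (PvReach.base (List.mem_append_right _ hdn))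
          · refine Or.inr (PvReach.step ih hd ?_)
            simp [hdv, hdn]
  · rintro (rfl | h)
    · exact PvReach.base List.mem_cons_self
    · induction h with
      | base hb =>
          rcases List.mem_append.mp hb with h | h
          · exact PvReach.base (List.mem_cons_of_mem _ h)
          · rcases (hnew _).mp h with ⟨h1, h2⟩
            exact PvReach.step (PvReach.base List.mem_cons_self) h1 h2
      | step _ hd hdv ih =>
          exact PvReach.step ih hd (fun hx => hdv (List.mem_append_left _ hx))

-- A's loop returns true iff some node reachable from the queue is in lv
theorem pvBfsLoop_iff (graph : List (Int × List Int)) (lv : List Int) :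
    ∀ (q v : List Int),
      pvBfsLoop graph lv q v = true ↔ ∃ n, PvReach graph v q n ∧ n ∈ lv := by
  intro q v
  induction q, v using pvBfsLoop.induct graph lv with
  | case1 v =>
      rw [pvBfsLoop]
      simp only [Bool.false_eq_true, false_iff]
      rintro ⟨n, hn, _⟩
      exact pvReach_nil graph v n hn
  | case2 current rest visited hcur =>
      rw [pvBfsLoop, if_pos hcur]
      simp only [true_iff]
      refine ⟨current, PvReach.base List.mem_cons_self, ?_⟩
      simpa [List.contains_eq_mem] using hcur
  | case3 current rest visited hcur st ih =>
      rw [pvBfsLoop, if_neg hcur]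
      simp only [pvFoldA] at ⊢
      have hst : st = (rest ++ pvNewA visited (pvChildren graph current),
          visited ++ pvNewA visited (pvChildren graph current)) := pvFoldA _ _ _
      simp only [hst] at ih
      rw [ih]
      have hcur' : current ∉ lv := by
        simpa [List.contains_eq_mem] using hcur
      have hexp := pvReach_expand (graph := graph) (v := visited) (q := rest)
        (new := pvNewA visited (pvChildren graph current)) (c := current)
        (fun d => mem_pvNewA _ _ _)
      constructor
      · rintro ⟨n, hn, hnlv⟩
        exact ⟨n, (hexp n).mpr (Or.inr hn), hnlv⟩
      · rintro ⟨n, hn, hnlv⟩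
        rcases (hexp n).mp hn with rfl | hn'
        · exact absurd hnlv hcur'
        · exact ⟨n, hn', hnlv⟩

-- pvChildren on nil / cons (first-match dict lookup)
theorem pvChildren_nil (n : Int) : pvChildren [] n = [] := by
  rw [pvChildren, PySem.Dict.getD_eq_get?_getD]; rfl

theorem pvChildren_cons (k : Int) (cs : List Int) (rest : List (Int × List Int)) (n : Int) :
    pvChildren ((k, cs) :: rest) n = if k == n then cs else pvChildren rest n := by
  rw [pvChildren, PySem.Dict.getD_eq_get?_getD, PySem.Dict.get?_mk_cons]
  by_cases h : (k == n) = true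
  · rw [if_pos h, if_pos h]; rfl
  · rw [if_neg h, if_neg h, pvChildren, PySem.Dict.getD_eq_get?_getD]

-- pvItems facts: each listed pair is the one first-match lookup reads, and every key with a
-- nonempty lookup (and not yet seen) is listed
theorem pvItems_children (g : List (Int × List Int)) : ∀ (seen : List Int) (p : Int × List Int),
    p ∈ pvItems seen g → p.1 ∉ seen ∧ pvChildren g p.1 = p.2 := by
  induction g with
  | nil => intro seen p hp; simp [pvItems] at hp
  | cons q rest ih =>
      intro seen p hp
      rcases q with ⟨k, cs⟩
      rw [pvItems] at hp
      by_cases hk : seen.contains k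
      · rw [if_pos hk] at hp
        rcases ih seen p hp with ⟨h1, h2⟩
        have hpk : p.1 ≠ k := fun he => h1 (by simpa [List.contains_eq_mem, he] using hk)
        have hbk : (k == p.1) = false := beq_eq_false_iff_ne.mpr (Ne.symm hpk)
        refine ⟨h1, ?_⟩
        rw [pvChildren_cons, hbk]
        simpa using h2
      · rw [if_neg hk] at hp
        rcases List.mem_cons.mp hp with rfl | hp
        · refine ⟨by simpa [List.contains_eq_mem] using hk, ?_⟩
          rw [pvChildren_cons]
          simp
        · rcases ih (seen ++ [k]) p hp with ⟨h1, h2⟩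
          have hpk : p.1 ≠ k := fun he => h1 (by simp [he])
          have hbk : (k == p.1) = false := beq_eq_false_iff_ne.mpr (Ne.symm hpk)
          refine ⟨fun hs => h1 (List.mem_append_left _ hs), ?_⟩
          rw [pvChildren_cons, hbk]
          simpa using h2

theorem pvItems_complete (g : List (Int × List Int)) : ∀ (seen : List Int) (k : Int),
    k ∉ seen → pvChildren g k ≠ [] → (k, pvChildren g k) ∈ pvItems seen g := by
  induction g with
  | nil => intro seen k _ hne; exact absurd (pvChildren_nil k) hne
  | cons q rest ih =>
      intro seen k hk hne
      rcases q with ⟨k0, cs0⟩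
      by_cases hkk : k = k0
      · subst hkk
        have hchil : pvChildren ((k, cs0) :: rest) k = cs0 := by
          rw [pvChildren_cons]; simp
        rw [hchil]
        rw [pvItems, if_neg (by simpa [List.contains_eq_mem] using hk)]
        exact List.mem_cons_self
      · have hb : (k0 == k) = false := beq_eq_false_iff_ne.mpr (fun h => hkk h.symm)
        have hchil : pvChildren ((k0, cs0) :: rest) k = pvChildren rest k := by
          rw [pvChildren_cons, hb]; simp
        rw [hchil] at hne ⊢
        rw [pvItems]
        by_cases hk0 : seen.contains k0
        · rw [if_pos hk0]
          exact ih seen k hk hne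
        · rw [if_neg hk0]
          refine List.mem_cons_of_mem _ (ih (seen ++ [k0]) k ?_ hne)
          intro hmem
          rcases List.mem_append.mp hmem with h | h
          · exact hk h
          · exact hkk (List.mem_singleton.mp h)

-- B's marking invariant: the start set stays marked and every marked node is PvReach-able
theorem pvInner_good (g : List (Int × List Int)) (node_idx : Int) (S0 : List Int)
    (k : Int) (cs : List Int) (hcs : ∀ c ∈ cs, c ∈ pvChildren g k)
    (hk : PvReach g (node_idx :: PySem.Set.ofList S0) S0 k) :
    ∀ (st : List Int × Bool),
      (∀ x ∈ S0, x ∈ st.1) → (∀ x ∈ st.1, PvReach g (node_idx :: PySem.Set.ofList S0) S0 x) →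
      (∀ x ∈ S0, x ∈ (pvInner node_idx cs st).1) ∧
      (∀ x ∈ (pvInner node_idx cs st).1, PvReach g (node_idx :: PySem.Set.ofList S0) S0 x) := by
  induction cs with
  | nil => intro st h1 h2; exact ⟨h1, h2⟩
  | cons c cs ih =>
      intro st h1 h2
      rw [pvInner, List.foldl_cons]
      by_cases hc : c ≠ node_idx ∧ st.1.contains c = false
      · rw [if_pos hc]
        have hcnot : c ∉ st.1 := by simpa [List.contains_eq_mem] using hc.2
        have hcreach : PvReach g (node_idx :: PySem.Set.ofList S0) S0 c := by
          refine PvReach.step hk (hcs c List.mem_cons_self) ?_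
          intro hcv
          rcases List.mem_cons.mp hcv with rfl | hcv
          · exact hc.1 rfl
          · rw [PySem.Set.mem_ofList] at hcv
            exact hcnot (h1 c hcv)
        have := ih (fun d hdc => hcs d (List.mem_cons_of_mem _ hdc))
          (PySem.Set.add st.1 c, true)
          (fun x hx => by rw [PySem.Set.mem_add]; exact Or.inl (h1 x hx))
          (fun x hx => by
            rw [PySem.Set.mem_add] at hx
            rcases hx with hx | rfl
            · exact h2 x hx
            · exact hcreach)
        exact this
      · rw [if_neg hc]
        exact ih (fun d hdc => hcs d (List.mem_cons_of_mem _ hdc)) st h1 h2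

theorem pvPass_good (g : List (Int × List Int)) (node_idx : Int) (S0 : List Int)
    (items : List (Int × List Int)) (hitems : ∀ p ∈ items, ∀ c ∈ p.2, c ∈ pvChildren g p.1) :
    ∀ (st : List Int × Bool),
      (∀ x ∈ S0, x ∈ st.1) → (∀ x ∈ st.1, PvReach g (node_idx :: PySem.Set.ofList S0) S0 x) →
      (∀ x ∈ S0, x ∈ (pvPass node_idx items st).1) ∧
      (∀ x ∈ (pvPass node_idx items st).1, PvReach g (node_idx :: PySem.Set.ofList S0) S0 x) := by
  induction items with
  | nil => intro st h1 h2; exact ⟨h1, h2⟩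
  | cons p rest ih =>
      intro st h1 h2
      rw [pvPass, List.foldl_cons]
      by_cases hp : st.1.contains p.1
      · rw [if_pos hp]
        have hpk : PvReach g (node_idx :: PySem.Set.ofList S0) S0 p.1 :=
          h2 p.1 (by simpa [List.contains_eq_mem] using hp)
        have hin := pvInner_good g node_idx S0 p.1 p.2
          (hitems p List.mem_cons_self) hpk st h1 h2
        exact ih (fun q hq => hitems q (List.mem_cons_of_mem _ hq)) _ hin.1 hin.2
      · rw [if_neg hp]
        exact ih (fun q hq => hitems q (List.mem_cons_of_mem _ hq)) st h1 h2

theorem pvFixLoop_good (g : List (Int × List Int)) (node_idx : Int) (S0 : List Int)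
    (items : List (Int × List Int)) (hitems : ∀ p ∈ items, ∀ c ∈ p.2, c ∈ pvChildren g p.1) :
    ∀ (marked : List Int),
      (∀ x ∈ S0, x ∈ marked) → (∀ x ∈ marked, PvReach g (node_idx :: PySem.Set.ofList S0) S0 x) →
      (∀ x ∈ S0, x ∈ pvFixLoop node_idx items marked) ∧
      (∀ x ∈ pvFixLoop node_idx items marked, PvReach g (node_idx :: PySem.Set.ofList S0) S0 x) := by
  intro marked
  induction marked using pvFixLoop.induct node_idx items with
  | case1 marked st h ih =>
      intro h1 h2
      rw [pvFixLoop]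
      simp only [show pvPass node_idx items (marked, false) = st from rfl, dif_pos h]
      have := pvPass_good g node_idx S0 items hitems (marked, false) h1 h2
      rw [show pvPass node_idx items (marked, false) = st from rfl] at this
      exact ih this.1 this.2
  | case2 marked st h =>
      intro h1 h2
      rw [pvFixLoop]
      simp only [show pvPass node_idx items (marked, false) = st from rfl, dif_neg h]
      have := pvPass_good g node_idx S0 items hitems (marked, false) h1 h2
      rw [show pvPass node_idx items (marked, false) = st from rfl] at this
      exact this

-- at the fixed point a further sweep changes nothing
theorem pvFixLoop_fix (node_idx : Int) (items : List (Int × List Int)) :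
    ∀ (marked : List Int),
      (pvPass node_idx items (pvFixLoop node_idx items marked, false)).2 = false := by
  intro marked
  induction marked using pvFixLoop.induct node_idx items with
  | case1 marked st h ih =>
      rw [pvFixLoop]
      simp only [show pvPass node_idx items (marked, false) = st from rfl, dif_pos h]
      exact ih
  | case2 marked st h =>
      rw [pvFixLoop]
      simp only [show pvPass node_idx items (marked, false) = st from rfl, dif_neg h]
      have hfalse : st.2 = false := by
        cases hb : st.2
        · rfl
        · exact absurd hb h
      have := pvPass_false node_idx items (marked, false)
        (by rw [show pvPass node_idx items (marked, false) = st from rfl]; exact hfalse)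
      rw [show pvPass node_idx items (marked, false) = st from rfl] at this
      rw [this.1]
      rw [show pvPass node_idx items (marked, false) = st from rfl]
      exact hfalse

-- every PvReach-able node ends up marked
theorem pvFixLoop_complete (g : List (Int × List Int)) (node_idx : Int) (S0 : List Int)
    (marked : List Int) (h1 : ∀ x ∈ S0, x ∈ pvFixLoop node_idx (pvItems [] g) marked) :
    ∀ (n : Int), PvReach g (node_idx :: PySem.Set.ofList S0) S0 n →
      n ∈ pvFixLoop node_idx (pvItems [] g) marked := by
  have hfix := pvFixLoop_fix node_idx (pvItems [] g) marked
  have hclosed := (pvPass_false node_idx (pvItems [] g)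
    (pvFixLoop node_idx (pvItems [] g) marked, false) hfix).2
  intro n hn
  induction hn with
  | base hb => exact h1 _ hb
  | @step c d hr hd hdv ih =>
      have hne : pvChildren g c ≠ [] := fun hnil => by rw [hnil] at hd; simp at hd
      have hitem := pvItems_complete g [] c (by simp) hne
      have hcc : (pvFixLoop node_idx (pvItems [] g) marked).contains c = true := by
        simpa [List.contains_eq_mem] using ih
      have := hclosed (c, pvChildren g c) hitem hcc d hd
      rcases this with rfl | hdm
      · exact absurd List.mem_cons_self hdv
      · exact hdm

-- ===== VERDICT (by name: the statement is the Claim_ definition above) =====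
theorem check_descendant_specifies_level_py_spec : Claim_equal_check_descendant_specifies_level_py := by
  unfold Claim_equal_check_descendant_specifies_level_py
  intro node_idx graph lv _
  unfold Spec_check_descendant_specifies_level_py
  simp only [check_descendant_specifies_level_py, check_descendant_specifies_level_py_alt]
  rw [Bool.eq_iff_iff]
  rw [pvBfsLoop_iff]
  rw [List.any_eq_true]
  set S0 := pvChildren graph node_idx with hS0
  have hvis : ∀ x : Int,
      x ∈ (PySem.Set.add (PySem.Set.ofList S0) node_idx : PySem.Set Int)
        ↔ x ∈ node_idx :: (PySem.Set.ofList S0 : PySem.Set Int) := by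
    intro x
    rw [PySem.Set.mem_add]
    simp only [List.mem_cons]
    tauto
  have hitems : ∀ p ∈ pvItems [] graph, ∀ c ∈ p.2, c ∈ pvChildren graph p.1 := by
    intro p hp c hc
    rw [(pvItems_children graph [] p hp).2]
    exact hc
  have hstart1 : ∀ x ∈ S0, x ∈ (PySem.Set.ofList S0 : PySem.Set Int) := by
    intro x hx; rw [PySem.Set.mem_ofList]; exact hx
  have hstart2 : ∀ x ∈ (PySem.Set.ofList S0 : PySem.Set Int),
      PvReach graph (node_idx :: PySem.Set.ofList S0) S0 x := by
    intro x hx; rw [PySem.Set.mem_ofList] at hx; exact PvReach.base hx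
  have hgood := pvFixLoop_good graph node_idx S0 (pvItems [] graph) hitems
    (PySem.Set.ofList S0) hstart1 hstart2
  constructor
  · rintro ⟨n, hn, hnlv⟩
    refine ⟨n, ?_, by simpa [List.contains_eq_mem] using hnlv⟩
    exact pvFixLoop_complete graph node_idx S0 (PySem.Set.ofList S0) hgood.1 n
      (pvReach_congr (fun _ => Iff.rfl) hvis hn)
  · rintro ⟨n, hn, hnlv⟩
    refine ⟨n, ?_, by simpa [List.contains_eq_mem] using hnlv⟩
    exact pvReach_congr (fun _ => Iff.rfl) (fun x => (hvis x).symm) (hgood.2 n hn)
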